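-- pv_equiv track=rewrite | github.com/addisonkline/aoc-2025 | day_2/utils.py | create_split_list
-- ===== SOURCE A (Python) =====
-- def create_split_list(
--     num: int,
--     split: tuple[int, int]
-- ) -> list[int]:
--     """
--     Given an integer and `split` tuple, create a list of integers representing that number split.
--     The tuple `split` encodes `item_length, n_items`.
--
--     For example:
--     - 11, (1, 2) -> [1, 1]
--     - 123456, (2, 3) -> [12, 34, 56]
--     """
--     split_indices = _get_split_indices(num, split)
--     num_as_str = str(num)
--
--     split_list: list[int] = []
--
--     for i in range(len(split_indices) - 1):
--         idx_this = split_indices[i]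
--         idx_next = split_indices[i + 1]
--         split_num = int(num_as_str[idx_this:idx_next])
--         split_list.append(split_num)
--
--     return split_list
--
-- def _get_split_indices(
--     num: int,
--     split: tuple[int, int]
-- ) -> list[int]:
--     """
--     Given an integer and `split` tuple, create a list of indices to use for splitting.
--
--     For example:
--     - 11, (1, 2) -> [0, 1, 2]
--     - 123456, (2, 3) -> [0, 2, 4, 6]
--     """
--     indices: list[int] = []
--
--     num_len = len(str(num))
--
--     for i in range(0, num_len, split[0]):
--         indices.append(i)
--
--     indices.append(num_len)
--
--     return indices
-- ===== SOURCE B (Python) =====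
-- def create_split_list(num, split):
--     """One-pass split: slice str(num) directly into step-sized chunks (no index table)."""
--     s = str(num)
--     step = split[0]
--     return [int(s[i:i + step]) for i in range(0, len(s), step)]
-- ===== Notes on version B (the rewrite author's own statement) =====
-- stated objective: simpler
-- what changed: Dropped the _get_split_indices helper and its index-table pass: B slices str(num) directly into step-sized chunks in one comprehension, relying on Python's slice clamping for the final partial chunk.
import Mathlib
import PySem

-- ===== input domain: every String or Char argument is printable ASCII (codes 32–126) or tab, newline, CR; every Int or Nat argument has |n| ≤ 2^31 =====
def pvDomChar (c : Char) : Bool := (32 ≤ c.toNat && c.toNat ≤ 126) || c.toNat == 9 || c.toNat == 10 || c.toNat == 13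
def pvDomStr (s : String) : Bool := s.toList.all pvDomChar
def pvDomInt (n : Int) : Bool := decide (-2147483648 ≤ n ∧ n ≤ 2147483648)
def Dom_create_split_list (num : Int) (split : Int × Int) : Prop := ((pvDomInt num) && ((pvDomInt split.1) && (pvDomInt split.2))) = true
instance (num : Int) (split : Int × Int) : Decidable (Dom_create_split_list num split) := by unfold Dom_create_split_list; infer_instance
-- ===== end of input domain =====

-- B drops A's _get_split_indices index-table pass and slices str(num) directly into
-- step-sized chunks in one comprehension (objective: simpler).

-- ===== PORT A =====
-- helper _get_split_indices, transliterated (strings handled as List Char via PySem)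
def pvGetSplitIndices (num : Int) (split : Int × Int) : List Int :=
  let num_len : Int := (PySem.Int.toChars num).length
  let indices : List Int :=
    (PySem.List.pyRange 0 num_len split.1).foldl (fun acc i => acc ++ [i]) []
  indices ++ [num_len]

-- int(...) is ofChars?; under Pre_ every chunk is a valid int literal, so the
-- '.getD 0' default is never taken on admitted inputs (Python raises ValueError outside Pre_).
def create_split_list (num : Int) (split : Int × Int) : List Int :=
  let split_indices := pvGetSplitIndices num split
  let num_as_str := PySem.Int.toChars num
  (PySem.List.pyRange 0 ((split_indices.length : Int) - 1) 1).foldl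
    (fun acc i =>
      let idx_this := (PySem.List.pyGet? split_indices i).getD 0
      let idx_next := (PySem.List.pyGet? split_indices (i + 1)).getD 0
      let split_num := (PySem.Int.ofChars? (PySem.List.slice num_as_str (some idx_this) (some idx_next))).getD 0
      acc ++ [split_num]) []

-- ===== PORT B =====
def create_split_list_alt (num : Int) (split : Int × Int) : List Int :=
  let s := PySem.Int.toChars num
  let step := split.1
  (PySem.List.pyRange 0 (s.length : Int) step).map
    (fun i => (PySem.Int.ofChars? (PySem.List.slice s (some i) (some (i + step)))).getD 0)

-- ===== PRECONDITION & SPEC =====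
-- Pre_ excludes exactly the inputs where Python A raises: step 0 (range's ValueError) and a
-- negative num with step 1 (the first chunk is the bare sign "-", so int('-') raises ValueError).
def Pre_create_split_list (num : Int) (split : Int × Int) : Prop :=
  split.1 ≠ 0 ∧ ¬ (num < 0 ∧ split.1 = 1)
instance (num : Int) (split : Int × Int) : Decidable (Pre_create_split_list num split) := by unfold Pre_create_split_list; infer_instance

def pvWitness_create_split_list : Int × (Int × Int) := (123456, (2, 3))

def Spec_create_split_list (num : Int) (split : Int × Int) (out : List Int) : Prop := out = create_split_list_alt num split
instance (num : Int) (split : Int × Int) (out : List Int) : Decidable (Spec_create_split_list num split out) := by unfold Spec_create_split_list; infer_instance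

-- ===== CLAIM (what is proved, stated in full; the proofs are below) =====
def Claim_equal_create_split_list : Prop := ∀ (num : Int) (split : Int × Int), Dom_create_split_list num split → Pre_create_split_list num split → Spec_create_split_list num split (create_split_list num split)

-- ===== LEMMAS AND PROOFS =====

-- str(num) is never the empty string
theorem pvToChars_len_pos (n : Int) : 0 < (PySem.Int.toChars n).length := by
  unfold PySem.Int.toChars
  split
  · simp
  · have : (Nat.toDigits 10 n.toNat).length ≠ 0 := by
      unfold Nat.toDigits
      simp only [Nat.toDigitsCore]
      split
      · simp
      · rw [Nat.toDigitsCore_lens_eq]; omega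
    omega

-- the two ports agree whenever the step is nonzero
theorem pvPorts_eq (num : Int) (split : Int × Int) (ht : split.1 ≠ 0) :
    create_split_list num split = create_split_list_alt num split := by
  simp only [create_split_list, create_split_list_alt, pvGetSplitIndices,
    PySem.List.foldl_append_singleton_eq_self, List.nil_append,
    PySem.List.foldl_append_singleton_eq_map]
  set s := PySem.Int.toChars num with hs
  set t := split.1 with htdef
  have hL : 0 < (s.length : Int) := by exact_mod_cast pvToChars_len_pos num
  rcases lt_or_gt_of_ne ht with hneg | hpos
  · -- negative step: both loops run over an empty range
    have hnil : PySem.List.pyRange 0 (s.length : Int) t = [] := by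
      simp [PySem.List.pyRange, ht]
      rw [if_neg (by omega), if_neg (by omega)]
    rw [hnil]
    simp
  · -- positive step: both sides are maps over the same n0 chunk starts
    set n0 : Int := ((s.length : Int) + t - 1) / t with hn0
    have hR : PySem.List.pyRange 0 (s.length : Int) t
        = (List.range n0.toNat).map (fun k : Nat => t * (k:Int)) := by
      rw [PySem.List.pyRange_of_pos 0 _ hpos]
      simp only [if_pos hL, zero_add, Int.sub_zero, hn0]
    have hn0one : 1 ≤ n0 := by rw [hn0, Int.le_ediv_iff_mul_le hpos]; omega
    have hbounds : (s.length : Int) ≤ t * n0 ∧ t * n0 < (s.length : Int) + t := by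
      have h1 := Int.mul_ediv_add_emod ((s.length : Int) + t - 1) t
      have h2 := Int.emod_nonneg ((s.length : Int) + t - 1) (by omega : t ≠ 0)
      have h3 := Int.emod_lt_of_pos ((s.length : Int) + t - 1) hpos
      constructor <;> linarith
    rw [hR]
    have hlen : ((List.map (fun k : Nat => t * (k:Int)) (List.range n0.toNat) ++ [((s.length:Int))]).length : Int) - 1 = ((n0.toNat : Nat) : Int) := by simp
    rw [hlen, PySem.List.pyRange_one]
    simp only [Int.sub_zero, Int.toNat_natCast, List.map_map]
    apply List.map_congr_left
    intro k hk
    rw [List.mem_range] at hk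
    simp only [Function.comp_apply, zero_add]
    have hget1 : (PySem.List.pyGet? (List.map (fun k : Nat => t * (k:Int)) (List.range n0.toNat) ++ [((s.length:Int))]) (k:Int)).getD 0 = t * (k:Int) := by
      rw [PySem.List.pyGet?_natCast]
      rw [List.getElem?_append_left (by simpa using hk)]
      simp [hk]
    have hcast : ((k:Int) + 1) = ((k+1 : Nat) : Int) := by push_cast; ring
    rw [hget1, hcast, PySem.List.pyGet?_natCast]
    rcases Nat.lt_or_ge (k+1) n0.toNat with hlt | hge
    · -- interior chunk: the next index is the start plus the step
      rw [List.getElem?_append_left (by simpa using hlt)]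
      simp only [List.getElem?_map, List.getElem?_range, hlt,
        Option.map_some, Option.getD_some]
      rw [show t * ((k+1 : Nat) : Int) = t * (k:Int) + t by push_cast; ring]
    · -- last chunk: A cuts at len(s), B at start+step; the slice clamps to the same tail
      have hkeq : k + 1 = n0.toNat := by omega
      rw [List.getElem?_append_right (by simpa using hge)]
      simp only [List.length_map, List.length_range, hkeq, Nat.sub_self,
        List.getElem?_cons_zero, Option.getD_some]
      have hint : t * (k:Int) + t = t * n0 := by
        have hk' : (k:Int) = n0 - 1 := by omega
        rw [hk']; ring
      have ha : 0 ≤ t * (k:Int) := by positivity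
      have hat : (s.length:Int) ≤ t * (k:Int) + t := by rw [hint]; exact hbounds.1
      rw [PySem.List.slice_toNat s ha (by omega : (0:Int) ≤ (s.length:Int)),
          PySem.List.slice_toNat s ha (by positivity : (0:Int) ≤ t * (k:Int) + t)]
      have h1 : (List.drop (t*(k:Int)).toNat s).length ≤ ((s.length:Int)).toNat - (t*(k:Int)).toNat := by
        simp [List.length_drop]
      have h2 : (List.drop (t*(k:Int)).toNat s).length ≤ (t*(k:Int)+t).toNat - (t*(k:Int)).toNat := by
        rw [List.length_drop]
        generalize t * (k:Int) = a at ha hat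
        omega
      rw [List.take_of_length_le h1, List.take_of_length_le h2]

-- ===== VERDICT (by name: the statement is the Claim_ definition above) =====
theorem create_split_list_spec : Claim_equal_create_split_list := by
  intro num split _ hpre
  unfold Spec_create_split_list
  exact pvPorts_eq num split hpre.1
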